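-- pv_equiv track=rewrite | github.com/phanhoailang/Education_Agent | modules/lesson_plan/QuizPipeline.py | _format_section_content
-- ===== SOURCE A (Python) =====
-- from typing import Dict, Any, List, Tuple, Optional, Callable, Iterable
--
-- def _format_section_content(content: str) -> str:
--     lines = [ln.strip() for ln in content.split("\n") if ln.strip()]
--     formatted: List[str] = []
--     for ln in lines:
--         if ln.startswith("**") and ln.rstrip().endswith(":**"):
--             if formatted:
--                 formatted.append("")
--             formatted.append(ln)
--         else:
--             formatted.append(ln)
--     return "\n".join(formatted)
-- ===== SOURCE B (Python) =====
-- def _is_header(ln: str) -> bool: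
--     return ln.startswith("**") and ln.endswith(":**")
--
--
-- def _format_section_content(content: str) -> str:
--     # Segment the stripped non-empty lines into sections: each header line
--     # starts a new section; joining the sections with a blank line ("\n\n")
--     # is exactly 'one blank line before every non-initial header'.
--     lines = [ln.strip() for ln in content.split("\n") if ln.strip()]
--
--     def sections(ls):
--         if not ls:
--             return []
--         i = 1
--         while i < len(ls) and not _is_header(ls[i]):
--             i += 1
--         return ["\n".join(ls[:i])] + sections(ls[i:])
--
--     return "\n\n".join(sections(lines))
-- ===== Notes on version B (the rewrite author's own statement) =====
-- stated objective: alternative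
-- what changed: Instead of a single stateful pass that interleaves sentinel empty strings into an accumulator, B segments the stripped lines into sections (each non-initial header starts a new section, found by an index scan and slicing, recursively) and joins the sections with a double newline separator; the blank-before-header falls out of the section join, not of per-line state.
import Mathlib
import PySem

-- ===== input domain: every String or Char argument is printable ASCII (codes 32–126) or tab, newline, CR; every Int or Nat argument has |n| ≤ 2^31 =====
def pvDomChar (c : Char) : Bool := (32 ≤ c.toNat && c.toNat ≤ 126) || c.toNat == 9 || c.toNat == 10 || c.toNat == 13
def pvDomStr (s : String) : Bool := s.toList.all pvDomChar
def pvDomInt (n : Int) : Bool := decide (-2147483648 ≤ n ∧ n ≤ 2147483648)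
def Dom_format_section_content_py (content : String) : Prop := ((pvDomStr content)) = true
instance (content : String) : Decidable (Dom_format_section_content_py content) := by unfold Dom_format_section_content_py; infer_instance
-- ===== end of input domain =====

-- B replaces A's stateful accumulator loop (sentinel "" entries) by segmenting the lines
-- into sections that each start at a non-initial header and joining sections with "\n\n".


-- ===== PORT A =====
-- one loop iteration of A: append "" before a header line unless formatted is empty
def pvStepA (acc : List String) (ln : String) : List String :=
  if PySem.Str.startswith ln "**" && PySem.Str.endswith (PySem.Str.rstrip ln) ":**" then
    (if acc = [] then acc else acc ++ [""]) ++ [ln]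
  else
    acc ++ [ln]

def format_section_content_py (content : String) : String :=
  -- content.split("\n"): sep is the nonempty literal "\n", so split? is exact (never none)
  let lines := (((PySem.Str.split? content "\n").getD []).filter
      (fun ln => PySem.Str.strip ln ≠ "")).map PySem.Str.strip
  PySem.Str.join "\n" (lines.foldl pvStepA [])

-- ===== PORT B =====
def pvIsHeader (ln : String) : Bool :=
  PySem.Str.startswith ln "**" && PySem.Str.endswith ln ":**"

-- Source B's `sections`: the while loop computes the first header index i ≥ 1, so
-- ls[:i] = head :: (tail before the first header) = head :: tail.takeWhile(not header)
-- and ls[i:] = tail.dropWhile(not header); both slice ports are exact here.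
def pvSections : List String → List String
  | [] => []
  | h :: t =>
      PySem.Str.join "\n" (h :: t.takeWhile (fun ln => !pvIsHeader ln))
        :: pvSections (t.dropWhile (fun ln => !pvIsHeader ln))
  termination_by ls => ls.length
  decreasing_by
    simpa using Nat.lt_succ_of_le (List.length_dropWhile_le _ _)

def format_section_content_py_alt (content : String) : String :=
  let lines := (((PySem.Str.split? content "\n").getD []).filter
      (fun ln => PySem.Str.strip ln ≠ "")).map PySem.Str.strip
  PySem.Str.join "\n\n" (pvSections lines)

-- ===== PRECONDITION & SPEC =====
def Spec_format_section_content_py (content : String) (out : String) : Prop := out = format_section_content_py_alt content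
instance (content : String) (out : String) : Decidable (Spec_format_section_content_py content out) := by unfold Spec_format_section_content_py; infer_instance

-- ===== CLAIM (what is proved, stated in full; the proofs are below) =====
def Claim_equal_format_section_content_py : Prop := ∀ (content : String), Dom_format_section_content_py content → Spec_format_section_content_py content (format_section_content_py content)

-- ===== LEMMAS AND PROOFS =====

theorem pv_dropWhile_idem (p : Char → Bool) (l : List Char) :
    List.dropWhile p (List.dropWhile p l) = List.dropWhile p l := by
  induction l with
  | nil => rfl
  | cons a t ih =>
    by_cases h : p a
    · simp [h, ih]
    · simp [h]

theorem pv_chars_rstrip_rstrip (l : List Char) :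
    PySem.Chars.rstrip (PySem.Chars.rstrip l) = PySem.Chars.rstrip l := by
  simp [PySem.Chars.rstrip, pv_dropWhile_idem]

theorem pv_rstrip_strip (s : String) :
    PySem.Str.rstrip (PySem.Str.strip s) = PySem.Str.strip s := by
  have h : PySem.Chars.rstrip (PySem.Chars.strip s.toList) = PySem.Chars.strip s.toList := by
    simp [PySem.Chars.strip, pv_chars_rstrip_rstrip]
  apply String.toList_inj.mp
  simp [PySem.Str.toList_rstrip, PySem.Str.toList_strip, h]

-- A line whose rstrip is itself passes A's header test iff it passes B's
theorem pv_hdr_eq (ln : String) (h : PySem.Str.rstrip ln = ln) :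
    (PySem.Str.startswith ln "**" && PySem.Str.endswith (PySem.Str.rstrip ln) ":**")
      = pvIsHeader ln := by
  rw [h]; rfl

def pvExpand (ln : String) : List String :=
  if PySem.Str.startswith ln "**" && PySem.Str.endswith (PySem.Str.rstrip ln) ":**" then
    ["", ln]
  else [ln]

theorem pv_foldl_char (ls : List String) (acc : List String) (h : acc ≠ []) :
    ls.foldl pvStepA acc = acc ++ ls.flatMap pvExpand := by
  induction ls generalizing acc with
  | nil => simp
  | cons x t ih =>
    simp only [List.foldl_cons, List.flatMap_cons]
    by_cases hx : (PySem.Str.startswith x "**" && PySem.Str.endswith (PySem.Str.rstrip x) ":**") = true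
    · rw [show pvStepA acc x = acc ++ [""] ++ [x] by
        simp only [pvStepA]; rw [if_pos hx, if_neg h]]
      rw [ih _ (by simp)]
      rw [show pvExpand x = ["", x] by simp only [pvExpand]; rw [if_pos hx]]
      simp
    · rw [show pvStepA acc x = acc ++ [x] by simp only [pvStepA]; rw [if_neg hx]]
      rw [ih _ (by simp)]
      rw [show pvExpand x = [x] by simp only [pvExpand]; rw [if_neg hx]]
      simp

theorem pv_join_cons_cons (sep p q : String) (t : List String) :
    PySem.Str.join sep (p :: q :: t) = p ++ sep ++ PySem.Str.join sep (q :: t) := by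
  apply String.toList_inj.mp
  simp [PySem.Str.toList_join, PySem.Chars.join_cons_cons]

theorem pv_join_singleton (sep p : String) :
    PySem.Str.join sep [p] = p := by
  apply String.toList_inj.mp
  simp [PySem.Str.toList_join, PySem.Chars.join_singleton]

theorem pv_join_split (sep x y : String) (xs ys : List String) :
    PySem.Str.join sep (x :: xs ++ y :: ys)
      = PySem.Str.join sep (x :: xs) ++ sep ++ PySem.Str.join sep (y :: ys) := by
  induction xs generalizing x with
  | nil =>
    rw [show (x :: [] ++ y :: ys) = x :: y :: ys from rfl, pv_join_cons_cons, pv_join_singleton]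
  | cons a t ih =>
    have h1 : x :: (a :: t) ++ y :: ys = x :: (a :: (t ++ y :: ys)) := by simp
    rw [h1, pv_join_cons_cons sep x a, show a :: (t ++ y :: ys) = a :: t ++ y :: ys from rfl,
      ih a, pv_join_cons_cons sep x a]
    simp [String.append_assoc]

theorem pv_flatMap_id (l : List String) (h : ∀ x ∈ l, pvExpand x = [x]) :
    l.flatMap pvExpand = l := by
  induction l with
  | nil => rfl
  | cons a t ih =>
    simp only [List.flatMap_cons, h a (by simp), ih (fun x hx => h x (by simp [hx]))]
    rfl

theorem pv_dropWhile_head (p : String → Bool) (t : List String) (h' : String) (t' : List String)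
    (h : t.dropWhile p = h' :: t') : p h' = false := by
  induction t with
  | nil => simp at h
  | cons a s ih =>
    by_cases ha : p a
    · exact ih (by simpa [List.dropWhile_cons, ha] using h)
    · simp only [List.dropWhile_cons, ha] at h
      simp_all

-- core: A's expanded line list joined with "\n" = B's sections joined with "\n\n"
theorem pv_core (n : Nat) : ∀ (t : List String) (h : String), t.length ≤ n →
    (∀ ln ∈ h :: t, PySem.Str.rstrip ln = ln) →
    PySem.Str.join "\n" (h :: t.flatMap pvExpand)
      = PySem.Str.join "\n\n" (pvSections (h :: t)) := by
  induction n with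
  | zero =>
    intro t h hlen _
    have : t = [] := List.eq_nil_of_length_eq_zero (Nat.le_zero.mp hlen)
    subst this
    simp [pvSections, pv_join_singleton]
  | succ n ih =>
    intro t h hlen hr
    have hsec : pvSections (h :: t)
        = PySem.Str.join "\n" (h :: t.takeWhile (fun ln => !pvIsHeader ln))
          :: pvSections (t.dropWhile (fun ln => !pvIsHeader ln)) := by
      simp [pvSections]
    have htk : (t.takeWhile (fun ln => !pvIsHeader ln)).flatMap pvExpand
        = t.takeWhile (fun ln => !pvIsHeader ln) := by
      apply pv_flatMap_id
      intro x hx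
      have hxnp : pvIsHeader x = false := by
        have := List.mem_takeWhile_imp hx
        simpa using this
      have hxr : PySem.Str.rstrip x = x :=
        hr x (List.mem_cons_of_mem _ ((List.takeWhile_prefix _).subset hx))
      simp only [pvExpand, pv_hdr_eq x hxr, hxnp]
      rfl
    have hsplit : t = t.takeWhile (fun ln => !pvIsHeader ln)
        ++ t.dropWhile (fun ln => !pvIsHeader ln) := (List.takeWhile_append_dropWhile ..).symm
    cases hd : t.dropWhile (fun ln => !pvIsHeader ln) with
    | nil =>
      have ht : t = t.takeWhile (fun ln => !pvIsHeader ln) := by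
        conv_lhs => rw [hsplit, hd]
        simp
      rw [hsec, hd]
      conv_lhs => rw [ht, htk]
      rw [show pvSections ([] : List String) = [] by simp [pvSections], pv_join_singleton]
    | cons h' t' =>
      have hh' : pvIsHeader h' = true := by
        have := pv_dropWhile_head (fun ln => !pvIsHeader ln) t h' t' hd
        simpa using this
      have hmem : ∀ x ∈ h' :: t', x ∈ t := by
        intro x hx
        rw [hsplit, hd]; exact List.mem_append_right _ hx
      have hr' : PySem.Str.rstrip h' = h' := hr h' (List.mem_cons_of_mem _ (hmem h' (by simp)))
      have hexp : pvExpand h' = ["", h'] := by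
        simp only [pvExpand, pv_hdr_eq h' hr', hh']; rfl
      have hflat : t.flatMap pvExpand
          = t.takeWhile (fun ln => !pvIsHeader ln) ++ "" :: h' :: t'.flatMap pvExpand := by
        conv_lhs => rw [hsplit, hd]
        simp [htk, hexp]
      have hlen' : t'.length ≤ n := by
        have h1 : (t.dropWhile (fun ln => !pvIsHeader ln)).length ≤ t.length :=
          List.length_dropWhile_le _ _
        rw [hd] at h1
        simp at h1
        omega
      have ihx := ih t' h' hlen' (by
        intro ln hln
        apply hr ln
        simp only [List.mem_cons] at hln ⊢
        rcases hln with rfl | hln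
        · exact Or.inr (hmem ln (by simp))
        · exact Or.inr (hmem ln (by simp [hln])))
      rw [hsec, hd, hflat]
      have hA : PySem.Str.join "\n" (h :: (t.takeWhile (fun ln => !pvIsHeader ln)
            ++ "" :: h' :: t'.flatMap pvExpand))
          = PySem.Str.join "\n" (h :: t.takeWhile (fun ln => !pvIsHeader ln)) ++ "\n\n"
              ++ PySem.Str.join "\n" (h' :: t'.flatMap pvExpand) := by
        rw [show h :: (t.takeWhile (fun ln => !pvIsHeader ln) ++ "" :: h' :: t'.flatMap pvExpand)
            = h :: t.takeWhile (fun ln => !pvIsHeader ln) ++ "" :: h' :: t'.flatMap pvExpand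
            from rfl,
          pv_join_split, pv_join_cons_cons]
        simp only [String.append_assoc]
        rw [show ("" : String) ++ ("\n" ++ PySem.Str.join "\n" (h' :: t'.flatMap pvExpand))
            = "\n" ++ PySem.Str.join "\n" (h' :: t'.flatMap pvExpand) by
          rw [String.empty_append]]
        rw [show ("\n" : String) ++ ("\n" ++ PySem.Str.join "\n" (h' :: t'.flatMap pvExpand))
            = "\n\n" ++ PySem.Str.join "\n" (h' :: t'.flatMap pvExpand) by
          rw [← String.append_assoc]
          congr 1]
      rw [hA, ihx]
      have hne : pvSections (h' :: t') ≠ [] := by simp [pvSections]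
      cases hs : pvSections (h' :: t') with
      | nil => exact absurd hs hne
      | cons s ss => rw [pv_join_cons_cons]

-- ===== VERDICT (by name: the statement is the Claim_ definition above) =====
theorem format_section_content_py_spec : Claim_equal_format_section_content_py := by
  intro content _
  unfold Spec_format_section_content_py format_section_content_py format_section_content_py_alt
  have hstrip : ∀ ln ∈ (((PySem.Str.split? content "\n").getD []).filter
      (fun ln => PySem.Str.strip ln ≠ "")).map PySem.Str.strip,
      PySem.Str.rstrip ln = ln := by
    intro ln hln
    rcases List.mem_map.mp hln with ⟨x, _, rfl⟩
    exact pv_rstrip_strip x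
  cases hL : (((PySem.Str.split? content "\n").getD []).filter
      (fun ln => PySem.Str.strip ln ≠ "")).map PySem.Str.strip with
  | nil => simp [pvSections, PySem.Str.join]
  | cons h t =>
    have h0 : pvStepA [] h = [h] := by
      simp only [pvStepA]; split <;> simp
    simp only [List.foldl_cons, h0]
    rw [pv_foldl_char t [h] (by simp)]
    exact pv_core t.length t h le_rfl (by rw [← hL]; exact hstrip)
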